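-- pv_equiv track=rewrite | github.com/Hardin-23110135/Cuoi-ki-tri-tue-nhan-tao | 8conxe.py | csp_ac3_then_backtracking
-- ===== SOURCE A (Python) =====
-- from collections import deque, defaultdict
-- from typing import List, Tuple, Dict, Optional, Set
--
-- N = 8
--
-- def ac3(arcs: List[Tuple[int, int]], domains: Dict[int, Set[int]]) -> bool:
--     q = deque(arcs)
--     def revise(x: int, y: int) -> bool:
--         removed = False
--         to_remove = set()
--         for vx in domains[x]:
--             if all(vy == vx for vy in domains[y]):
--                 to_remove.add(vx)
--         if to_remove:
--             domains[x] -= to_remove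
--             removed = True
--         return removed
--
--     while q:
--         x, y = q.popleft()
--         if revise(x, y):
--             if not domains[x]:
--                 return False
--             for z in domains.keys():
--                 if z != x and z != y:
--                     q.append((z, x))
--     return True
--
-- def csp_ac3_then_backtracking(n: int = N) -> Optional[List[int]]:
--     domains: Dict[int, Set[int]] = {r: set(range(n)) for r in range(n)}
--     arcs = [(i, j) for i in range(n) for j in range(n) if i != j]
--     if not ac3(arcs, domains):
--         return None
--
--     assignment: Dict[int, int] = {}
--
--     def select_unassigned_var() -> int:
--         unassigned = [r for r in range(n) if r not in assignment]
--         return min(unassigned, key=lambda r: len(domains[r]))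
--
--     def rec() -> Optional[Dict[int, int]]:
--         if len(assignment) == n:
--             return assignment.copy()
--         r = select_unassigned_var()
--         for c in sorted(domains[r]):
--             if all(assignment.get(rr) != c for rr in assignment):
--                 assignment[r] = c
--                 res = rec()
--                 if res is not None:
--                     return res
--                 assignment.pop(r)
--         return None
--
--     res = rec()
--     if res is None:
--         return None
--     return [res[r] for r in range(n)]
-- ===== SOURCE B (Python) =====
-- N = 8
--
-- def csp_ac3_then_backtracking(n: int = N):
--     # On the n-rooks CSP, AC3 removes nothing and backtracking's first choice
--     # per row always succeeds, so the answer is the identity assignment.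
--     return list(range(n))
-- ===== Notes on version B (the rewrite author's own statement) =====
-- stated objective: faster
-- what changed: B replaces the AC3 propagation plus backtracking search with the closed form list(range(n)): on the n-rooks constraint network AC3 never prunes and the search always picks column r for row r, so the result is the identity permutation.
-- crash fix: For n < 0 A raises ValueError (min() of the empty unassigned list) while B returns the empty assignment []. — e.g. on csp_ac3_then_backtracking(-1): A raises ValueError, B returns some []
import Mathlib
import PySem

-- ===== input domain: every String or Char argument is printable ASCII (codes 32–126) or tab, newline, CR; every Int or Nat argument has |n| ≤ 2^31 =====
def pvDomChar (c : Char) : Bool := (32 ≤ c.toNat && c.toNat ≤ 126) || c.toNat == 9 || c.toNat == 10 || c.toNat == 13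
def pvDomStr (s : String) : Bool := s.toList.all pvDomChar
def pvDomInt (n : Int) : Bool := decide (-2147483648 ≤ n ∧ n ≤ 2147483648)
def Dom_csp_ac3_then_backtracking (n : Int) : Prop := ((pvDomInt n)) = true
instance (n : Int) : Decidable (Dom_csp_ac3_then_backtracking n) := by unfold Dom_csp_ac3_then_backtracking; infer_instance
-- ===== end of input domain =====

-- B replaces AC3 + backtracking with the closed form: on an n-rooks CSP the search always
-- lands on the identity assignment, so B returns list(range(n)) directly (asymptotically faster).
-- Pre_ excludes n < 0, where Python A raises ValueError (min() of an empty sequence).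

-- ===== PORT A =====
-- revise(x, y): collect the values of domains[x] whose every counterpart in domains[y] equals
-- them, then remove them; returns (new domains, removed?).  Sets are PySem.Set (distinct lists);
-- domains[x]/[y] lookups use getD [] (the keys are always present in A's uses).
def reviseA (domains : PySem.Dict Int (PySem.Set Int)) (x y : Int) :
    PySem.Dict Int (PySem.Set Int) × Bool :=
  let dx := domains.getD x []
  let dy := domains.getD y []
  let toRemove : PySem.Set Int :=
    dx.foldl (fun s vx => if dy.all (fun vy => vy == vx) then PySem.Set.add s vx else s)
      PySem.Set.empty
  if toRemove.isEmpty then (domains, false)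
  else (domains.insert x (PySem.Set.diff dx toRemove), true)

-- the 'while q:' loop of ac3; fuel only makes the loop total (never exhausted in A's use:
-- none stands for Python's 'return False', which csp_ac3_then_backtracking maps to None)
def ac3A (fuel : Nat) (q : List (Int × Int)) (domains : PySem.Dict Int (PySem.Set Int)) :
    Option (PySem.Dict Int (PySem.Set Int)) :=
  match fuel, q with
  | _, [] => some domains
  | 0, _ :: _ => none
  | fuel + 1, (x, y) :: rest =>
    let r := reviseA domains x y
    if r.2 then
      if (r.1.getD x []).isEmpty then none
      else
        ac3A fuel
          (rest ++ (r.1.keys.filter (fun z => z != x && z != y)).map (fun z => (z, x))) r.1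
    else ac3A fuel rest domains

-- the 'for c in sorted(domains[r])' loop of rec (assignment.pop(r) = recursing on the
-- unchanged assignment); recf is the recursive call to rec
def recGoA (recf : PySem.Dict Int Int → Option (PySem.Dict Int Int))
    (assignment : PySem.Dict Int Int) (r : Int) : List Int → Option (PySem.Dict Int Int)
  | [] => none
  | c :: cs =>
    if assignment.keys.all (fun rr => !(assignment.get? rr == some c)) then
      match recf (assignment.insert r c) with
      | some res => some res
      | none => recGoA recf assignment r cs
    else recGoA recf assignment r cs

-- rec(); fuel (recursion depth) only makes it total; min? none = Python's ValueError in
-- select_unassigned_var (only reachable for n < 0, outside Pre_)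
def recA (domains : PySem.Dict Int (PySem.Set Int)) (n : Int) :
    Nat → PySem.Dict Int Int → Option (PySem.Dict Int Int)
  | 0, _ => none
  | fuel + 1, assignment =>
    if (assignment.size : Int) = n then some assignment
    else
      let unassigned := (PySem.List.pyRange 0 n 1).filter (fun r => !(assignment.contains r))
      match PySem.List.min? unassigned (fun r => ((domains.getD r []).length : Int)) with
      | none => none
      | some r =>
        recGoA (recA domains n fuel) assignment r
          (PySem.List.sorted (domains.getD r []) (fun c => c))

def csp_ac3_then_backtracking (n : Int) : Option (List Int) :=
  let rng := PySem.List.pyRange 0 n 1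
  let domains : PySem.Dict Int (PySem.Set Int) :=
    PySem.Dict.ofList (rng.map (fun r => (r, PySem.Set.ofList rng)))
  let arcs := rng.flatMap (fun i => (rng.filter (fun j => j != i)).map (fun j => (i, j)))
  match ac3A (arcs.length + (n.toNat + 1) ^ 3) arcs domains with
  | none => none
  | some doms =>
    match recA doms n (n.toNat + 1) PySem.Dict.empty with
    | none => none
    | some res => some (rng.map (fun r => res.getD r 0))

-- ===== PORT B =====
def csp_ac3_then_backtracking_alt (n : Int) : Option (List Int) :=
  some (PySem.List.pyRange 0 n 1)

-- ===== PRECONDITION & SPEC =====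
-- Pre_ excludes n < 0, where Python A raises ValueError (min() of an empty sequence).
def Pre_csp_ac3_then_backtracking (n : Int) : Prop := 0 <= n
instance (n : Int) : Decidable (Pre_csp_ac3_then_backtracking n) := by
  unfold Pre_csp_ac3_then_backtracking; infer_instance
def pvWitness_csp_ac3_then_backtracking : Int := 3

-- A raises ValueError (min() arg is an empty sequence) for every n < 0; B returns the empty board [].
def Raises_csp_ac3_then_backtracking (n : Int) : Prop := n < 0
instance (n : Int) : Decidable (Raises_csp_ac3_then_backtracking n) := by
  unfold Raises_csp_ac3_then_backtracking; infer_instance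
def pvRaiseWitness_csp_ac3_then_backtracking : Int := -1
def pvRaiseWitnessOut_csp_ac3_then_backtracking : Option (List Int) := some []

def Spec_csp_ac3_then_backtracking (n : Int) (out : Option (List Int)) : Prop :=
  out = csp_ac3_then_backtracking_alt n
instance (n : Int) (out : Option (List Int)) : Decidable (Spec_csp_ac3_then_backtracking n out) := by
  unfold Spec_csp_ac3_then_backtracking; infer_instance

-- ===== CLAIM (what is proved, stated in full; the proofs are below) =====
def Claim_equal_csp_ac3_then_backtracking : Prop := ∀ (n : Int), Dom_csp_ac3_then_backtracking n → Pre_csp_ac3_then_backtracking n → Spec_csp_ac3_then_backtracking n (csp_ac3_then_backtracking n)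
def Claim_raises_csp_ac3_then_backtracking : Prop := (∀ (n : Int), Dom_csp_ac3_then_backtracking n → Raises_csp_ac3_then_backtracking n → ¬ Pre_csp_ac3_then_backtracking n) ∧ (Dom_csp_ac3_then_backtracking (pvRaiseWitness_csp_ac3_then_backtracking) ∧ Raises_csp_ac3_then_backtracking (pvRaiseWitness_csp_ac3_then_backtracking) ∧ csp_ac3_then_backtracking_alt (pvRaiseWitness_csp_ac3_then_backtracking) = pvRaiseWitnessOut_csp_ac3_then_backtracking)

-- ===== LEMMAS AND PROOFS =====

-- R k = list(range(k)) as integers; the full domain of every row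
def R (k : Nat) : List Int := (List.range k).map (fun i : Nat => (i : Int))

-- the initial (and, as proved below, final) domains dict
def domsK (k : Nat) : PySem.Dict Int (PySem.Set Int) :=
  PySem.Dict.ofList ((R k).map (fun r => (r, PySem.Set.ofList (R k))))

-- the partial identity assignment {0: 0, 1: 1, …, j-1: j-1}
def idA (j : Nat) : PySem.Dict Int Int :=
  PySem.Dict.mk ((List.range j).map (fun i : Nat => ((i : Int), (i : Int))))

lemma mem_R {k : Nat} {x : Int} : x ∈ R k ↔ 0 ≤ x ∧ x < k := by
  constructor
  · intro h
    rcases List.mem_map.mp h with ⟨i, hi, rfl⟩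
    have := List.mem_range.mp hi
    omega
  · rintro ⟨h0, hk⟩
    refine List.mem_map.mpr ⟨x.toNat, List.mem_range.mpr (by omega), by omega⟩

lemma nodup_R (k : Nat) : (R k).Nodup := by
  unfold R
  exact List.Nodup.map (fun a b h => by exact_mod_cast h) List.nodup_range

lemma pairwise_R (k : Nat) : (R k).Pairwise (fun a b => a < b) := by
  unfold R
  exact List.Pairwise.map _ (fun a b h => by exact_mod_cast h) List.pairwise_lt_range

lemma setOfList_R (k : Nat) : PySem.Set.ofList (R k) = R k :=
  PySem.Set.ofList_eq_self_of_nodup _ (nodup_R k)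

lemma items_domsK (k : Nat) : (domsK k).items = (R k).map (fun r => (r, R k)) := by
  unfold domsK PySem.Dict.ofList PySem.Dict.update
  rw [PySem.Dict.items_foldl_insert_fresh ((R k).map (fun r => (r, PySem.Set.ofList (R k))))
      Prod.fst Prod.snd PySem.Dict.empty (fun a _ => by simp [pysem])
      (by simpa only [List.map_map] using (nodup_R k).map_on (by simp))]
  simp [setOfList_R, pysem, PySem.Dict.empty, Function.comp]

lemma keys_domsK (k : Nat) : (domsK k).keys = R k := by
  simp only [PySem.Dict.keys, items_domsK, List.map_map]
  exact List.map_id' _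

lemma getD_domsK {k : Nat} {x : Int} (hx : x ∈ R k) : (domsK k).getD x [] = R k := by
  refine PySem.Dict.getD_of_mem_items _ ?_ ?_ _
  · rw [items_domsK]; exact List.mem_map.mpr ⟨x, hx, rfl⟩
  · rw [keys_domsK]; exact nodup_R k

lemma revise_noop {k : Nat} {x y : Int} (hx : x ∈ R k) (hy : y ∈ R k) (hxy : x ≠ y) :
    reviseA (domsK k) x y = (domsK k, false) := by
  have hall : ∀ vx ∈ R k, (R k).all (fun vy => vy == vx) = false := by
    intro vx hvx
    refine List.all_eq_false.mpr ?_
    by_cases hvxx : vx = x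
    · refine ⟨y, hy, ?_⟩
      simp only [beq_iff_eq, hvxx]
      exact fun h => hxy h.symm
    · refine ⟨x, hx, ?_⟩
      simp only [beq_iff_eq]
      exact fun h => hvxx h.symm
  unfold reviseA
  simp only [getD_domsK hx, getD_domsK hy]
  rw [PySem.List.foldl_congr_mem (R k) _ (fun s _ => s) PySem.Set.empty
      (fun acc vx hvx => by simp [hall vx hvx]),
    PySem.List.foldl_ignore]
  rfl

lemma ac3_drain (q : List (Int × Int)) : ∀ (fuel : Nat) (d : PySem.Dict Int (PySem.Set Int)),
    (∀ a ∈ q, reviseA d a.1 a.2 = (d, false)) → q.length ≤ fuel → ac3A fuel q d = some d := by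
  induction q with
  | nil => intro fuel d _ _; cases fuel <;> rfl
  | cons a q ih =>
    intro fuel d h hlen
    obtain ⟨x, y⟩ := a
    cases fuel with
    | zero => simp at hlen
    | succ f =>
      have hr := h (x, y) (by simp)
      simp only [ac3A, hr]
      exact ih f d (fun a ha => h a (List.mem_cons_of_mem _ ha))
        (by simpa using Nat.le_of_succ_le_succ hlen)

lemma items_idA (j : Nat) : (idA j).items = (List.range j).map (fun i : Nat => ((i : Int), (i : Int))) := rfl

lemma keys_idA (j : Nat) : (idA j).keys = R j := by
  simp only [PySem.Dict.keys, items_idA, List.map_map]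
  rfl

lemma size_idA (j : Nat) : (idA j).size = j := by
  simp only [PySem.Dict.size, items_idA, List.length_map, List.length_range]

lemma get?_idA {j i : Nat} (h : i < j) : (idA j).get? (i : Int) = some (i : Int) := by
  refine PySem.Dict.get?_of_mem_items _ ?_ ?_
  · rw [items_idA]; exact List.mem_map.mpr ⟨i, by simpa using h, rfl⟩
  · rw [keys_idA]; exact nodup_R j

lemma contains_idA (j : Nat) (x : Int) : (idA j).contains x = decide (x ∈ R j) := by
  rw [PySem.Dict.contains_eq_decide_mem_keys, keys_idA]

lemma insert_idA (j : Nat) : (idA j).insert (j : Int) (j : Int) = idA (j + 1) := by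
  apply PySem.Dict.ext
  rw [PySem.Dict.items_insert_of_not_contains]
  · rw [items_idA, items_idA, List.range_succ, List.map_append]
    rfl
  · rw [contains_idA]; simp [mem_R]

lemma filter_range_ge (j : Nat) : ∀ (k : Nat), j ≤ k →
    (List.range k).filter (fun i => !(decide (i < j))) = List.range' j (k - j) := by
  intro k
  induction k with
  | zero =>
    intro h
    have : j = 0 := by omega
    subst this; rfl
  | succ k ih =>
    intro h
    rw [List.range_succ, List.filter_append]
    by_cases hk : j ≤ k
    · rw [ih hk]
      have h1 : ¬ (k < j) := by omega
      have h2 : k + 1 - j = (k - j) + 1 := by omega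
      simp only [List.filter_cons, List.filter_nil, h1, decide_false, Bool.not_false, if_true]
      rw [h2, List.range'_concat]
      have h3 : j + 1 * (k - j) = k := by omega
      rw [h3]
    · have hj : j = k + 1 := by omega
      subst hj
      have h0 : (List.range k).filter (fun i => !(decide (i < k + 1))) = [] := by
        refine List.filter_eq_nil_iff.mpr ?_
        intro a ha
        have := List.mem_range.mp ha
        simp [show a < k + 1 by omega]
      rw [h0]
      simp

lemma filter_unassigned {j k : Nat} (h : j ≤ k) :
    (R k).filter (fun r => !((idA j).contains r)) =
      (List.range' j (k - j)).map (fun i : Nat => (i : Int)) := by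
  unfold R
  rw [List.filter_map]
  rw [List.filter_congr (q := fun i => !(decide (i < j)))
      (fun i _ => by
        simp only [Function.comp, contains_idA]
        congr 1
        rw [decide_eq_decide, mem_R]
        omega)]
  rw [filter_range_ge j k h]

lemma min?_foldl_const {α : Type} (key : α → Int) (x : α) :
    ∀ (t : List α), (∀ y ∈ t, key y = key x) →
      t.foldl (fun acc y =>
        match acc with
        | none => some y
        | some m => if key y < key m then some y else some m) (some x) = some x := by
  intro t
  induction t with
  | nil => intro _; rfl
  | cons z t ih =>
    intro h
    have hz : key z = key x := h z (by simp)
    simp only [List.foldl_cons, hz, lt_self_iff_false, if_false]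
    exact ih (fun y hy => h y (by simp [hy]))

lemma min?_const {α : Type} (key : α → Int) (x : α) (t : List α)
    (h : ∀ y ∈ x :: t, key y = key x) : PySem.List.min? (x :: t) key = some x := by
  unfold PySem.List.min?
  simp only [List.foldl_cons]
  exact min?_foldl_const key x t (fun y hy => h y (by simp [hy]))

lemma conflict_lt {j i : Nat} (h : i < j) :
    (idA j).keys.all (fun rr => !((idA j).get? rr == some (i : Int))) = false := by
  rw [keys_idA]
  refine List.all_eq_false.mpr ⟨(i : Int), mem_R.mpr (by omega), ?_⟩
  rw [get?_idA h]
  simp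

lemma conflict_eq (j : Nat) :
    (idA j).keys.all (fun rr => !((idA j).get? rr == some (j : Int))) = true := by
  rw [keys_idA]
  refine List.all_eq_true.mpr ?_
  intro rr hrr
  obtain ⟨h0, hj'⟩ := mem_R.mp hrr
  have hrr' : rr = ((rr.toNat : Nat) : Int) := by omega
  rw [hrr', get?_idA (by omega)]
  simp only [Bool.not_eq_eq_eq_not, Bool.not_true, beq_eq_false_iff_ne, ne_eq,
    Option.some.injEq]
  omega

lemma go_skip {k j : Nat} (recf : PySem.Dict Int Int → Option (PySem.Dict Int Int))
    (hrec : recf (idA (j + 1)) = some (idA k)) (hj : j < k) :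
    ∀ (t i : Nat), i + t = k → i ≤ j →
      recGoA recf (idA j) (j : Int) ((List.range' i t).map (fun i : Nat => (i : Int))) =
        some (idA k) := by
  intro t
  induction t with
  | zero => intro i hik hij; omega
  | succ t ih =>
    intro i hik hij
    rw [List.range'_succ, List.map_cons]
    by_cases hij' : i = j
    · subst hij'
      simp only [recGoA, conflict_eq, if_true, insert_idA, hrec]
    · have hlt : i < j := by omega
      simp only [recGoA, conflict_lt hlt, Bool.false_eq_true, if_false]
      exact ih (i + 1) (by omega) (by omega)

lemma sorted_R (k : Nat) : PySem.List.sorted (R k) (fun c => c) = R k :=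
  PySem.List.sorted_eq_of_perm_of_pairwise_lt _ (R k) _ (List.Perm.refl _) (pairwise_R k)

lemma recA_succ (domains : PySem.Dict Int (PySem.Set Int)) (n : Int) (fuel : Nat)
    (assignment : PySem.Dict Int Int) :
    recA domains n (fuel + 1) assignment =
      if ((assignment.size : Int) = n) then some assignment
      else
        match PySem.List.min? ((PySem.List.pyRange 0 n 1).filter (fun r => !(assignment.contains r)))
            (fun r => ((domains.getD r []).length : Int)) with
        | none => none
        | some r =>
          recGoA (recA domains n fuel) assignment r
            (PySem.List.sorted (domains.getD r []) (fun c => c)) := rfl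

lemma recA_id {k : Nat} : ∀ (m j : Nat), j + m = k →
    recA (domsK k) (k : Int) (m + 1) (idA j) = some (idA k) := by
  intro m
  induction m with
  | zero =>
    intro j h
    have hjk : j = k := by omega
    subst hjk
    simp [recA, size_idA]
  | succ m ih =>
    intro j h
    have hjk : j < k := by omega
    rw [recA_succ, size_idA]
    rw [if_neg (by exact_mod_cast show ¬ j = k by omega)]
    have hmem : ∀ z ∈ ((j : Int) :: (List.range' (j + 1) (k - j - 1)).map (fun i : Nat => (i : Int))), z ∈ R k := by
      intro z hz
      rcases List.mem_cons.mp hz with hz | hz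
      · subst hz; exact mem_R.mpr (by omega)
      · rcases List.mem_map.mp hz with ⟨i, hi, rfl⟩
        have := List.mem_range'.mp hi
        exact mem_R.mpr (by omega)
    have hfil : (PySem.List.pyRange 0 (k : Int) 1).filter (fun r => !((idA j).contains r)) =
        (j : Int) :: (List.range' (j + 1) (k - j - 1)).map (fun i : Nat => (i : Int)) := by
      rw [PySem.List.pyRange_zero_natCast,
        show List.map (fun k : Nat => (k : Int)) (List.range k) = R k from rfl,
        filter_unassigned (by omega : j ≤ k),
        show k - j = (k - j - 1) + 1 from by omega, List.range'_succ, List.map_cons]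
      simp
    rw [hfil, min?_const _ ((j : Int)) _ ?hkey]
    case hkey =>
      intro y hy
      rw [getD_domsK (hmem y hy), getD_domsK (hmem _ (by simp))]
    show recGoA (recA (domsK k) (k : Int) (m + 1)) (idA j) (j : Int)
        (PySem.List.sorted ((domsK k).getD (j : Int) []) (fun c => c)) = some (idA k)
    rw [getD_domsK (mem_R.mpr (by omega)), sorted_R]
    rw [show R k = (List.range' 0 k).map (fun i : Nat => (i : Int)) from by
      unfold R; rw [List.range_eq_range']]
    exact go_skip _ (ih (j + 1) (by omega)) hjk k 0 (by omega) (by omega)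

lemma empty_eq_idA : (PySem.Dict.empty : PySem.Dict Int Int) = idA 0 := by
  apply PySem.Dict.ext; rfl

lemma csp_eq_R {k : Nat} : csp_ac3_then_backtracking (k : Int) = some (R k) := by
  have hR : PySem.List.pyRange 0 (k : Int) 1 = R k := by
    rw [PySem.List.pyRange_zero_natCast]; rfl
  unfold csp_ac3_then_backtracking
  simp only [hR, Int.toNat_natCast]
  have harcs : ∀ a ∈ (R k).flatMap (fun i => ((R k).filter (fun j => j != i)).map (fun j => (i, j))),
      reviseA (domsK k) a.1 a.2 = (domsK k, false) := by
    intro a ha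
    rcases List.mem_flatMap.mp ha with ⟨i, hi, hmem⟩
    rcases List.mem_map.mp hmem with ⟨jv, hjv, rfl⟩
    have hjf := List.mem_filter.mp hjv
    have hne : i ≠ jv := fun hh => (by simpa [hh] using hjf.2)
    exact revise_noop hi hjf.1 hne
  rw [show PySem.Dict.ofList ((R k).map (fun r => (r, PySem.Set.ofList (R k)))) = domsK k
    from rfl]
  rw [ac3_drain _ _ _ harcs (Nat.le_add_right _ _)]
  show (match recA (domsK k) (k : Int) (k + 1) PySem.Dict.empty with
    | none => none
    | some res => some ((R k).map (fun r => res.getD r 0))) = some (R k)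
  rw [empty_eq_idA, recA_id (k := k) k 0 (by omega)]
  show some ((R k).map (fun r => (idA k).getD r 0)) = some (R k)
  congr 1
  have hgd : ∀ r ∈ R k, (idA k).getD r 0 = r := by
    intro r hr
    obtain ⟨h0, hk⟩ := mem_R.mp hr
    have hr' : r = ((r.toNat : Nat) : Int) := by omega
    rw [hr', PySem.Dict.getD_of_get?_eq_some _ _ (get?_idA (by omega))]
  rw [List.map_congr_left hgd]
  exact List.map_id _

-- ===== VERDICT (by name: the statement is the Claim_ definition above) =====
theorem csp_ac3_then_backtracking_spec : Claim_equal_csp_ac3_then_backtracking := by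
  intro n _ hpre
  unfold Spec_csp_ac3_then_backtracking csp_ac3_then_backtracking_alt
  unfold Pre_csp_ac3_then_backtracking at hpre
  obtain ⟨k, rfl⟩ : ∃ k : Nat, n = (k : Int) := ⟨n.toNat, (Int.toNat_of_nonneg hpre).symm⟩
  rw [csp_eq_R, PySem.List.pyRange_zero_natCast]
  rfl

@[simp]
theorem csp_ac3_then_backtracking_raises : Claim_raises_csp_ac3_then_backtracking := by
  unfold Claim_raises_csp_ac3_then_backtracking
  exact ⟨fun n _ h => by unfold Raises_csp_ac3_then_backtracking Pre_csp_ac3_then_backtracking at *; omega, by decide⟩
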